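-- pv_equiv track=rewrite | github.com/ccctw-ma/leetcode | src/Medium/BackTrackingTest/pyramidTransition.py | pyramidTransition3
-- ===== SOURCE A (Python) =====
-- import collections
-- from functools import cache
-- from typing import List
--
-- def pyramidTransition3(bottom: str, allowed: List[str]) -> bool:
--     trans = collections.defaultdict(list)
--     for p in allowed:
--         trans[p[:2]].append(p[2])
--
--     @cache
--     def search(a, b):
--         if len(b) >= 2:
--             if not search(b, ''):
--                 return False
--         if len(a) == 2:
--             if not b:
--                 return a in trans
--             else:
--                 return any(search(b + t, '') for t in trans.get(a, []))
--         else: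
--             return any(search(a[1:], b + t) for t in trans.get(a[:2], []))
--
--     return search(bottom, '')
-- ===== SOURCE B (Python) =====
-- import collections
-- from typing import List
--
-- def pyramidTransition3(bottom: str, allowed: List[str]) -> bool:
--     trans = collections.defaultdict(list)
--     for p in allowed:
--         trans[p[:2]].append(p[2])
--
--     def rows(row):
--         # all complete next rows of a row of length >= 2
--         if len(row) == 2:
--             return trans.get(row, [])
--         return [t + rest for t in trans.get(row[:2], []) for rest in rows(row[1:])]
--
--     level = {bottom}
--     for _ in range(len(bottom) - 2):
--         level = {nxt for row in level for nxt in rows(row)}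
--     return any(row in trans for row in level)
-- ===== Notes on version B (the rewrite author's own statement) =====
-- stated objective: alternative
-- what changed: A does a memoized depth-first search over partial states (remaining-bottom suffix, next-row prefix) with a prefix-solvability pruning check; B replaces this with a level-by-level breadth-first reduction: it builds each complete next row with a small recursive builder and keeps a set of reachable rows per level, answering whether some final length-2 row is a transition key.
import Mathlib
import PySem

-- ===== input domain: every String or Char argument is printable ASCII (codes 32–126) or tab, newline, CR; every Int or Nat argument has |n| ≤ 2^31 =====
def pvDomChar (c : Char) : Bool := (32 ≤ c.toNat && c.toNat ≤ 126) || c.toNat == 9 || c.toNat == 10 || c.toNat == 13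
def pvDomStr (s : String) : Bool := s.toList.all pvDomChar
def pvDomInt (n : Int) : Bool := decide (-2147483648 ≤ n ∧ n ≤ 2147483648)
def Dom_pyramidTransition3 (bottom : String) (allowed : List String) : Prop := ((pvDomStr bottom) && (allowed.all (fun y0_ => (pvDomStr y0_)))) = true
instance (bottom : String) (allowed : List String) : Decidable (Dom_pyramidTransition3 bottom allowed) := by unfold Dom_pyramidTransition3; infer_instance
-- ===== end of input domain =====

-- B replaces A's memoized partial-row DFS (with prefix pruning) by a level-by-level BFS over
-- complete rows; objective: alternative (same worst-case cost, different decomposition).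

-- ===== PORT A =====
-- shared first loop of both Pythons: `for p in allowed: trans[p[:2]].append(p[2])`.
-- When len(p) < 3 Python raises IndexError (pyGet? = none); those inputs are excluded by Pre_,
-- the port skips such p.
def pvBuildTrans (allowed : List String) : PySem.Dict (List Char) (List Char) :=
  allowed.foldl (fun d p =>
    match PySem.List.pyGet? p.toList 2 with
    | some c => d.modify (PySem.List.slice p.toList none (some 2)) [] (· ++ [c])
    | none => d) PySem.Dict.empty

-- A's recursive `search(a, b)`; fuel makes the recursion total (Python's @cache does not change
-- values; the initial fuel below is proved sufficient, fuel 0 is never reached from the top call)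
def pvSearch (T : PySem.Dict (List Char) (List Char)) : Nat → List Char → List Char → Bool
  | 0, _, _ => false
  | F + 1, a, b =>
    (if 2 ≤ b.length then pvSearch T F b [] else true) &&
    (if a.length = 2 then
      (if b = [] then T.contains a
       else (T.getD a []).any (fun t => pvSearch T F (b ++ [t]) []))
     else
      (T.getD (PySem.List.slice a none (some 2)) []).any
        (fun t => pvSearch T F (PySem.List.slice a (some 1) none) (b ++ [t])))

def pyramidTransition3 (bottom : String) (allowed : List String) : Bool :=
  let T := pvBuildTrans allowed
  pvSearch T ((bottom.toList.length + 1) * (bottom.toList.length + 1)) bottom.toList []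

-- ===== PORT B =====
-- B's `rows(row)`: all complete next rows of a row of length ≥ 2 (never called on shorter rows;
-- the base case returns the single transition characters as length-1 rows)
def pvRows (T : PySem.Dict (List Char) (List Char)) : List Char → List (List Char)
  | [x, y] => (T.getD [x, y] []).map (fun t => [t])
  | x :: y :: z :: rest =>
      (T.getD (PySem.List.slice (x :: y :: z :: rest) none (some 2)) []).flatMap
        (fun t => (pvRows T (PySem.List.slice (x :: y :: z :: rest) (some 1) none)).map
          (fun r => t :: r))
  | _ => []
  termination_by row => row.length
  decreasing_by simp [PySem.List.slice_from_one]

-- B's set comprehension `{nxt for row in level for nxt in rows(row)}`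
def pvStep (T : PySem.Dict (List Char) (List Char)) (level : PySem.Set (List Char)) :
    PySem.Set (List Char) :=
  level.foldl (fun acc row => PySem.Set.update acc (pvRows T row)) PySem.Set.empty

-- B's `for _ in range(len(bottom) - 2): level = …`
def pvLoop (T : PySem.Dict (List Char) (List Char)) : Nat → PySem.Set (List Char) → PySem.Set (List Char)
  | 0, level => level
  | k + 1, level => pvLoop T k (pvStep T level)

def pyramidTransition3_alt (bottom : String) (allowed : List String) : Bool :=
  let T := pvBuildTrans allowed
  (pvLoop T (bottom.toList.length - 2) (PySem.Set.ofList [bottom.toList])).any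
    (fun row => T.contains row)

-- ===== PRECONDITION & SPEC =====
-- Pre_ excludes exactly the inputs where both Pythons raise IndexError at `p[2]`:
-- some allowed string has length < 3.
def Pre_pyramidTransition3 (bottom : String) (allowed : List String) : Prop :=
  ∀ p ∈ allowed, 3 ≤ p.toList.length
instance (bottom : String) (allowed : List String) : Decidable (Pre_pyramidTransition3 bottom allowed) := by
  unfold Pre_pyramidTransition3; infer_instance

def pvWitness_pyramidTransition3 : String × List String := ("ABC", ["ABD", "BCA", "DAA"])

def Spec_pyramidTransition3 (bottom : String) (allowed : List String) (out : Bool) : Prop := out = pyramidTransition3_alt bottom allowed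
instance (bottom : String) (allowed : List String) (out : Bool) : Decidable (Spec_pyramidTransition3 bottom allowed out) := by unfold Spec_pyramidTransition3; infer_instance

-- ===== CLAIM (what is proved, stated in full; the proofs are below) =====
def Claim_equal_pyramidTransition3 : Prop := ∀ (bottom : String) (allowed : List String), Dom_pyramidTransition3 bottom allowed → Pre_pyramidTransition3 bottom allowed → Spec_pyramidTransition3 bottom allowed (pyramidTransition3 bottom allowed)

-- ===== LEMMAS AND PROOFS =====

-- every key of the built transition map has length 2
def pvKeys2 (T : PySem.Dict (List Char) (List Char)) : Prop :=
  ∀ k, T.contains k = true → k.length = 2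

theorem pvContains_of_getD_mem (T : PySem.Dict (List Char) (List Char)) {k : List Char}
    {t : Char} (h : t ∈ T.getD k []) : T.contains k = true := by
  cases hc : T.contains k with
  | true => rfl
  | false => rw [PySem.Dict.getD_of_not_contains T [] hc] at h; simp at h

theorem pvKeys2_build (allowed : List String) : pvKeys2 (pvBuildTrans allowed) := by
  unfold pvBuildTrans
  have H : ∀ (l : List String) (d : PySem.Dict (List Char) (List Char)), pvKeys2 d →
      pvKeys2 (l.foldl (fun d p =>
        match PySem.List.pyGet? p.toList 2 with
        | some c => d.modify (PySem.List.slice p.toList none (some 2)) [] (· ++ [c])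
        | none => d) d) := by
    intro l
    induction l with
    | nil => intro d hd; exact hd
    | cons p l ih =>
      intro d hd
      simp only [List.foldl_cons]
      apply ih
      cases hg : PySem.List.pyGet? p.toList 2 with
      | none => simpa [hg] using hd
      | some c =>
        have hlen : 2 < p.toList.length := by
          by_contra hlt
          rw [show ((2:Int)) = ((2:Nat):Int) by norm_num, PySem.List.pyGet?_natCast] at hg
          obtain ⟨h2, -⟩ := List.getElem?_eq_some_iff.mp hg
          omega
        intro k hk
        rw [PySem.Dict.contains_modify] at hk
        rcases Bool.or_eq_true_iff.mp hk with h | h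
        · have hk2 : k = PySem.List.slice p.toList none (some 2) := by
            exact eq_of_beq h
          subst hk2
          rw [PySem.List.slice_to p.toList (by norm_num)]
          simp only [List.length_take]
          omega
        · exact hd k h
  exact H allowed _ (by intro k hk; rw [PySem.Dict.contains_empty] at hk; simp at hk)

-- rewriting lemmas for pvRows
theorem pvRows_pair (T : PySem.Dict (List Char) (List Char)) (x y : Char) :
    pvRows T [x, y] = (T.getD [x, y] []).map (fun t => [t]) := by
  simp [pvRows]

theorem pvRows_cons (T : PySem.Dict (List Char) (List Char)) (x y z : Char) (rest : List Char) :
    pvRows T (x :: y :: z :: rest) =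
      (T.getD [x, y] []).flatMap (fun t => (pvRows T (y :: z :: rest)).map (fun r => t :: r)) := by
  rw [pvRows]
  rw [PySem.List.slice_to _ (by norm_num), PySem.List.slice_from_one]
  simp

theorem pvRows_length (T : PySem.Dict (List Char) (List Char)) :
    ∀ row c, c ∈ pvRows T row → c.length + 1 = row.length := by
  intro row
  induction row with
  | nil => intro c hc; simp [pvRows] at hc
  | cons x row ih =>
    cases row with
    | nil => intro c hc; simp [pvRows] at hc
    | cons y row2 =>
      cases row2 with
      | nil =>
        intro c hc
        rw [pvRows_pair] at hc
        simp only [List.mem_map] at hc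
        obtain ⟨t, -, rfl⟩ := hc
        simp
      | cons z rest =>
        intro c hc
        rw [pvRows_cons] at hc
        simp only [List.mem_flatMap, List.mem_map] at hc
        obtain ⟨t, -, c', hc', rfl⟩ := hc
        have := ih c' hc'
        simp at this ⊢
        omega

-- the proof-side characterisation both ports are reduced to: "row reduces to an apex"
def pvRed (T : PySem.Dict (List Char) (List Char)) (row : List Char) : Bool :=
  if row.length ≤ 2 then T.contains row
  else (pvRows T row).attach.any (fun c => pvRed T c.1)
  termination_by row.length
  decreasing_by
    have := pvRows_length T row _ (by exact c.2)
    omega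

theorem pvRed_eq (T : PySem.Dict (List Char) (List Char)) (row : List Char) :
    pvRed T row = if row.length ≤ 2 then T.contains row
                  else (pvRows T row).any (fun c => pvRed T c) := by
  rw [pvRed]
  by_cases h : row.length ≤ 2
  · simp [h]
  · simp [h]

-- a head choice certifies the key: some next row exists ⇒ the first pair is a key
theorem pvRows_key (T : PySem.Dict (List Char) (List Char)) (x y : Char) (rest c : List Char)
    (h : c ∈ pvRows T (x :: y :: rest)) : T.contains [x, y] = true := by
  cases rest with
  | nil =>
    rw [pvRows_pair] at h
    simp only [List.mem_map] at h
    obtain ⟨t, ht, -⟩ := h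
    exact pvContains_of_getD_mem T ht
  | cons z rest =>
    rw [pvRows_cons] at h
    simp only [List.mem_flatMap] at h
    obtain ⟨t, ht, -⟩ := h
    exact pvContains_of_getD_mem T ht

-- prefix of a next row of (row ++ s) is a next row of row
theorem pvRows_prefix (T : PySem.Dict (List Char) (List Char)) :
    ∀ row s c, 2 ≤ row.length → c ∈ pvRows T (row ++ s) →
      c.take (row.length - 1) ∈ pvRows T row := by
  intro row
  induction row with
  | nil => intro s c h2; simp at h2
  | cons x row ih =>
    cases row with
    | nil => intro s c h2; simp at h2
    | cons y row2 =>
      cases row2 with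
      | nil =>
        intro s c _ hc
        cases s with
        | nil =>
          have hlen := pvRows_length T _ _ hc
          simp at hlen
          simpa [List.take_of_length_le (by omega : c.length ≤ 1)] using hc
        | cons z s' =>
          rw [show ([x, y] ++ z :: s') = (x :: y :: z :: s') by rfl, pvRows_cons] at hc
          simp only [List.mem_flatMap, List.mem_map] at hc
          obtain ⟨t, ht, c', -, rfl⟩ := hc
          rw [pvRows_pair]
          simp only [List.mem_map]
          exact ⟨t, ht, by simp⟩
      | cons z rest =>
        intro s c _ hc
        rw [show ((x :: y :: z :: rest) ++ s) = (x :: y :: z :: (rest ++ s)) by rfl,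
            pvRows_cons] at hc
        simp only [List.mem_flatMap, List.mem_map] at hc
        obtain ⟨t, ht, c', hc', rfl⟩ := hc
        have hrec := ih s c' (by simp) (by simpa using hc')
        rw [pvRows_cons]
        simp only [List.mem_flatMap, List.mem_map]
        refine ⟨t, ht, c'.take ((y :: z :: rest).length - 1), by simpa using hrec, ?_⟩
        simp only [List.length_cons]
        rw [List.take_cons (by omega)]
        have he : rest.length + 1 + 1 + 1 - 1 - 1 = rest.length + 1 + 1 - 1 := by omega
        rw [he]

-- reducibility of a row passes to its prefixes of length ≥ 2
theorem pvRed_prefix (T : PySem.Dict (List Char) (List Char)) :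
    ∀ n r s, r.length + s.length ≤ n → 2 ≤ r.length →
      pvRed T (r ++ s) = true → pvRed T r = true := by
  intro n
  induction n with
  | zero => intro r s hn h2; omega
  | succ n ih =>
    intro r s hn h2 hred
    cases s with
    | nil => simpa using hred
    | cons w s' =>
      simp only [List.length_cons] at hn
      have hlen3 : ¬ (r ++ w :: s').length ≤ 2 := by simp; omega
      rw [pvRed_eq, if_neg hlen3, List.any_eq_true] at hred
      obtain ⟨c, hc, hcred⟩ := hred
      have hc1 := pvRows_prefix T r (w :: s') c h2 hc
      by_cases hr2 : r.length = 2
      · obtain ⟨x, y, rfl⟩ : ∃ x y, r = [x, y] := by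
          match r, hr2 with
          | [x, y], _ => exact ⟨x, y, rfl⟩
        rw [pvRed_eq, if_pos (by simp)]
        exact pvRows_key T x y (w :: s') c (by simpa using hc)
      · -- 3 ≤ r.length
        have hclen := pvRows_length T _ _ hc
        simp only [List.length_append, List.length_cons] at hclen
        have hc1len : (c.take (r.length - 1)).length = r.length - 1 := by
          simp only [List.length_take]
          omega
        have hdl : (c.drop (r.length - 1)).length = c.length - (r.length - 1) := by simp
        have hcsplit : c = c.take (r.length - 1) ++ c.drop (r.length - 1) :=
          (List.take_append_drop _ _).symm
        rw [hcsplit] at hcred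
        have hred1 : pvRed T (c.take (r.length - 1)) = true := by
          refine ih (c.take (r.length - 1)) (c.drop (r.length - 1)) ?_ (by rw [hc1len]; omega) hcred
          rw [hc1len, hdl]
          omega
        rw [pvRed_eq, if_neg (by omega), List.any_eq_true]
        exact ⟨c.take (r.length - 1), hc1, hred1⟩

-- the fuel measure of A's search
def pvNu (a b : List Char) : Nat := (a.length + b.length) * (a.length + b.length) + a.length

-- one-step unfolding of pvSearch (definitional)
theorem pvSearch_succ (T : PySem.Dict (List Char) (List Char)) (F : Nat) (a b : List Char) :
    pvSearch T (F + 1) a b =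
      ((if 2 ≤ b.length then pvSearch T F b [] else true) &&
       (if a.length = 2 then
         (if b = [] then T.contains a
          else (T.getD a []).any (fun t => pvSearch T F (b ++ [t]) []))
        else
         (T.getD (PySem.List.slice a none (some 2)) []).any
           (fun t => pvSearch T F (PySem.List.slice a (some 1) none) (b ++ [t])))) := rfl

-- Boolean absorption of A's pruning conjunct
theorem pvAbsorb (p x : Bool) (h : x = true → p = true) : (p && x) = x := by
  cases x with
  | false => simp
  | true => simp [h rfl]

-- characterisation of A's search on reachable states
theorem pvSearch_eq (T : PySem.Dict (List Char) (List Char)) :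
    ∀ F a b, pvNu a b < F → 2 ≤ a.length →
      pvSearch T F a b =
        if b = [] then pvRed T a else (pvRows T a).any (fun c => pvRed T (b ++ c)) := by
  intro F
  induction F with
  | zero => intro a b hnu h2; exact absurd hnu (by omega)
  | succ F ih =>
    intro a b hnu h2
    by_cases ha2 : a.length = 2
    · obtain ⟨x, y, rfl⟩ : ∃ x y, a = [x, y] := by
        match a, ha2 with
        | [x, y], _ => exact ⟨x, y, rfl⟩
      by_cases hbe : b = []
      · subst hbe
        rw [pvSearch_succ, if_neg (by simp), if_pos ha2, if_pos rfl, if_pos rfl]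
        simp [pvRed_eq]
      · have hb1 : 1 ≤ b.length := by
          cases b with
          | nil => exact absurd rfl hbe
          | cons v b' => simp
        have hinner : ∀ t : Char, pvSearch T F (b ++ [t]) [] = pvRed T (b ++ [t]) := by
          intro t
          have hb : pvNu (b ++ [t]) [] < F := by
            simp only [pvNu, List.length_append, List.length_cons, List.length_nil] at hnu ⊢
            nlinarith
          simpa using ih (b ++ [t]) [] hb (by simp; omega)
        have hmap : ((T.getD [x, y] []).map (fun t => [t])).any (fun c => pvRed T (b ++ c)) =
            (T.getD [x, y] []).any (fun t => pvRed T (b ++ [t])) := by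
          rw [List.any_map]; rfl
        rw [pvSearch_succ, if_pos ha2, if_neg hbe, if_neg hbe, pvRows_pair, hmap]
        simp only [hinner]
        by_cases hb2 : 2 ≤ b.length
        · have hp : pvSearch T F b [] = pvRed T b := by
            have hb : pvNu b [] < F := by
              simp only [pvNu, List.length_cons, List.length_nil] at hnu ⊢
              nlinarith
            simpa using ih b [] hb hb2
          rw [if_pos hb2, hp]
          apply pvAbsorb
          intro hX
          obtain ⟨t, -, hred⟩ := List.any_eq_true.mp hX
          exact pvRed_prefix T (b.length + 1) b [t] (by simp) hb2 hred
        · rw [if_neg hb2]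
          simp
    · have ha3 : 3 ≤ a.length := by omega
      obtain ⟨x, y, z, rest, rfl⟩ : ∃ x y z rest, a = x :: y :: z :: rest := by
        match a, ha3 with
        | x :: y :: z :: rest, _ => exact ⟨x, y, z, rest, rfl⟩
      have htail : PySem.List.slice (x :: y :: z :: rest) (some 1) none = y :: z :: rest := by
        simp [PySem.List.slice_from_one]
      have htake : PySem.List.slice (x :: y :: z :: rest) none (some 2) = [x, y] := by
        rw [PySem.List.slice_to _ (by norm_num)]
        rfl
      have hinner : ∀ t : Char, pvSearch T F (y :: z :: rest) (b ++ [t]) =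
          (pvRows T (y :: z :: rest)).any (fun c => pvRed T (b ++ t :: c)) := by
        intro t
        have hb : pvNu (y :: z :: rest) (b ++ [t]) < F := by
          simp only [pvNu, List.length_append, List.length_cons, List.length_nil] at hnu ⊢
          nlinarith
        have hcall := ih (y :: z :: rest) (b ++ [t]) hb (by simp)
        rw [if_neg (by simp)] at hcall
        rw [hcall]
        have hac : ∀ c : List Char, b ++ [t] ++ c = b ++ t :: c := by intro c; simp
        simp only [hac]
      have hRHS : (if b = [] then pvRed T (x :: y :: z :: rest)
            else (pvRows T (x :: y :: z :: rest)).any (fun c => pvRed T (b ++ c))) =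
          (pvRows T (x :: y :: z :: rest)).any (fun c => pvRed T (b ++ c)) := by
        by_cases hbe : b = []
        · subst hbe
          rw [if_pos rfl, pvRed_eq, if_neg (by simp)]
          simp
        · rw [if_neg hbe]
      have hmap2 : ∀ t : Char,
          ((pvRows T (y :: z :: rest)).map (fun r => t :: r)).any (fun c => pvRed T (b ++ c)) =
            (pvRows T (y :: z :: rest)).any (fun c => pvRed T (b ++ t :: c)) := by
        intro t
        rw [List.any_map]; rfl
      rw [hRHS, pvRows_cons, List.any_flatMap]
      simp only [hmap2]
      rw [pvSearch_succ, htail, htake, if_neg ha2]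
      simp only [hinner]
      by_cases hb2 : 2 ≤ b.length
      · have hp : pvSearch T F b [] = pvRed T b := by
          have hb : pvNu b [] < F := by
            simp only [pvNu, List.length_cons, List.length_nil] at hnu ⊢
            nlinarith
          simpa using ih b [] hb hb2
        rw [if_pos hb2, hp]
        apply pvAbsorb
        intro hX
        obtain ⟨t, -, hany⟩ := List.any_eq_true.mp hX
        obtain ⟨c, -, hred⟩ := List.any_eq_true.mp hany
        exact pvRed_prefix T (b.length + (t :: c).length) b (t :: c) (by omega) hb2 hred
      · rw [if_neg hb2]
        simp

theorem pvSearch_top (T : PySem.Dict (List Char) (List Char)) (hK : pvKeys2 T)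
    (F : Nat) (a : List Char) (hF : pvNu a [] < F) :
    pvSearch T F a [] = pvRed T a := by
  by_cases h2 : 2 ≤ a.length
  · simpa using pvSearch_eq T F a [] hF h2
  · cases F with
    | zero => exact absurd hF (by omega)
    | succ F =>
      rw [pvSearch_succ, if_neg (by simp), if_neg (by omega)]
      have hsl : PySem.List.slice a none (some 2) = a := by
        rw [PySem.List.slice_to _ (by norm_num)]
        exact List.take_of_length_le (by omega)
      have hcon : T.contains a = false := by
        cases hc : T.contains a with
        | false => rfl
        | true => have := hK a hc; omega
      rw [hsl, PySem.Dict.getD_of_not_contains T [] hcon, pvRed_eq, if_pos (by omega), hcon]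
      simp

-- B side: membership in one BFS step
theorem pvStep_mem (T : PySem.Dict (List Char) (List Char)) (level : PySem.Set (List Char))
    (c : List Char) : c ∈ pvStep T level ↔ ∃ r ∈ level, c ∈ pvRows T r := by
  unfold pvStep
  have H : ∀ (lvl : List (List Char)) (acc : PySem.Set (List Char)),
      c ∈ lvl.foldl (fun acc row => PySem.Set.update acc (pvRows T row)) acc ↔
        c ∈ acc ∨ ∃ r ∈ lvl, c ∈ pvRows T r := by
    intro lvl
    induction lvl with
    | nil => intro acc; simp
    | cons r lvl ih =>
      intro acc
      simp only [List.foldl_cons]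
      rw [ih, PySem.Set.mem_update]
      constructor
      · rintro ((h | h) | h)
        · exact Or.inl h
        · exact Or.inr ⟨r, by simp, h⟩
        · obtain ⟨r', hr', hm⟩ := h
          exact Or.inr ⟨r', by simp [hr'], hm⟩
      · rintro (h | ⟨r', hr', hm⟩)
        · exact Or.inl (Or.inl h)
        · rcases List.mem_cons.mp hr' with rfl | hr''
          · exact Or.inl (Or.inr hm)
          · exact Or.inr ⟨r', hr'', hm⟩
  rw [H]
  simp [PySem.Set.empty]

theorem pvLoop_any (T : PySem.Dict (List Char) (List Char)) :
    ∀ k level, (∀ r ∈ level, r.length = k + 2) →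
      ((pvLoop T k level).any (fun r => T.contains r) = true ↔
        ∃ r ∈ level, pvRed T r = true) := by
  intro k
  induction k with
  | zero =>
    intro level hlen
    simp only [pvLoop, List.any_eq_true]
    constructor
    · rintro ⟨r, hr, hc⟩
      exact ⟨r, hr, by rwa [pvRed_eq, if_pos (by have := hlen r hr; omega)]⟩
    · rintro ⟨r, hr, hc⟩
      refine ⟨r, hr, ?_⟩
      rwa [pvRed_eq, if_pos (by have := hlen r hr; omega)] at hc
  | succ k ih =>
    intro level hlen
    have hlen' : ∀ r ∈ pvStep T level, r.length = k + 2 := by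
      intro r hr
      obtain ⟨r0, hr0, hrm⟩ := (pvStep_mem T level r).mp hr
      have h1 := pvRows_length T r0 r hrm
      have h2 := hlen r0 hr0
      omega
    rw [show pvLoop T (k + 1) level = pvLoop T k (pvStep T level) from rfl, ih _ hlen']
    constructor
    · rintro ⟨r', hr', hred⟩
      obtain ⟨r, hr, hrm⟩ := (pvStep_mem T level r').mp hr'
      refine ⟨r, hr, ?_⟩
      rw [pvRed_eq, if_neg (by have := hlen r hr; omega), List.any_eq_true]
      exact ⟨r', hrm, hred⟩
    · rintro ⟨r, hr, hred⟩
      rw [pvRed_eq, if_neg (by have := hlen r hr; omega), List.any_eq_true] at hred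
      obtain ⟨r', hrm, hred'⟩ := hred
      exact ⟨r', (pvStep_mem T level r').mpr ⟨r, hr, hrm⟩, hred'⟩

theorem pvAlt_eq_red (T : PySem.Dict (List Char) (List Char)) (r0 : List Char) :
    ((pvLoop T (r0.length - 2) (PySem.Set.ofList [r0])).any (fun row => T.contains row)) =
      pvRed T r0 := by
  have hof : PySem.Set.ofList [r0] = [r0] := rfl
  by_cases h2 : 2 ≤ r0.length
  · rw [Bool.eq_iff_iff,
        pvLoop_any T (r0.length - 2) _ (by intro r hr; rw [hof] at hr; simp at hr; subst hr; omega)]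
    constructor
    · rintro ⟨r, hr, h⟩
      rw [hof] at hr
      simp at hr
      rwa [← hr]
    · intro h
      exact ⟨r0, by rw [hof]; simp, h⟩
  · have h0 : r0.length - 2 = 0 := by omega
    rw [h0]
    show (PySem.Set.ofList [r0]).any (fun row => T.contains row) = pvRed T r0
    rw [hof, pvRed_eq, if_pos (by omega)]
    simp

-- ===== VERDICT (by name: the statement is the Claim_ definition above) =====
theorem pyramidTransition3_spec : Claim_equal_pyramidTransition3 := by
  intro bottom allowed _ _
  unfold Spec_pyramidTransition3 pyramidTransition3 pyramidTransition3_alt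
  have hK := pvKeys2_build allowed
  rw [pvSearch_top _ hK _ _ (by unfold pvNu; simp; nlinarith [bottom.toList.length.zero_le]),
      pvAlt_eq_red]
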